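-- pv_equiv track=rewrite | github.com/PedroLauand/EvansScenario | Indices.py | evansObIndexA3
-- ===== SOURCE A (Python) =====
-- def evansObIndexA3(a,b,c):
--     i=0
--     for C in range(2):
--         for B in range(2):
--             for A in range(3):
--                 if A==a and B==b and C==c:
--                     return i
--                 else:
--                     i=i+1
-- ===== SOURCE B (Python) =====
-- def evansObIndexA3(a, b, c):
--     # closed-form index in the C-major, B-middle, A-minor enumeration
--     if a in (0, 1, 2) and b in (0, 1) and c in (0, 1):
--         return (c * 2 + b) * 3 + a
--     return None
-- ===== Notes on version B (the rewrite author's own statement) =====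
-- stated objective: simpler
-- what changed: Replaced the triple nested loop search over the 3x2x2 enumeration by a range guard and the closed-form index (c*2+b)*3+a.
import Mathlib
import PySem

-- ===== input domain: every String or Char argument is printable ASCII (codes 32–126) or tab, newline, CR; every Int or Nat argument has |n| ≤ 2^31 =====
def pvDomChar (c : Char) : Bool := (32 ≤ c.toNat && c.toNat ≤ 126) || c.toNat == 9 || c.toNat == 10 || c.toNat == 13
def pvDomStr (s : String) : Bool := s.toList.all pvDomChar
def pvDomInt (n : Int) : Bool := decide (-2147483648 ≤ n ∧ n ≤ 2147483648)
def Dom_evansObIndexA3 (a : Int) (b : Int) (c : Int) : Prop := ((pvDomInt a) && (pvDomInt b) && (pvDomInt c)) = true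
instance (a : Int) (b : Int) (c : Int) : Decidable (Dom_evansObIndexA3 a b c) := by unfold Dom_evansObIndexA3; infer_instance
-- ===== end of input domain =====

-- B replaces A's triple nested loop search with a range guard and the closed-form index (c*2+b)*3+a (simpler).

-- ===== PORT A =====
-- innermost loop: for A in range(3)
def pvLoopA3 (a b c : Int) (B C : Int) : List Int → Int → Option Int × Int
  | [], i => (none, i)
  | A :: rest, i =>
      if A = a ∧ B = b ∧ C = c then (some i, i)
      else pvLoopA3 a b c B C rest (i + 1)

-- middle loop: for B in range(2)
def pvLoopB3 (a b c : Int) (C : Int) : List Int → Int → Option Int × Int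
  | [], i => (none, i)
  | B :: rest, i =>
      match pvLoopA3 a b c B C (PySem.List.pyRange 0 3 1) i with
      | (some r, i') => (some r, i')
      | (none, i') => pvLoopB3 a b c C rest i'

-- outer loop: for C in range(2)
def pvLoopC3 (a b c : Int) : List Int → Int → Option Int × Int
  | [], i => (none, i)
  | C :: rest, i =>
      match pvLoopB3 a b c C (PySem.List.pyRange 0 2 1) i with
      | (some r, i') => (some r, i')
      | (none, i') => pvLoopC3 a b c rest i'

def evansObIndexA3 (a : Int) (b : Int) (c : Int) : Option Int :=
  (pvLoopC3 a b c (PySem.List.pyRange 0 2 1) 0).1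

-- ===== PORT B =====
def evansObIndexA3_alt (a : Int) (b : Int) (c : Int) : Option Int :=
  if (a = 0 ∨ a = 1 ∨ a = 2) ∧ (b = 0 ∨ b = 1) ∧ (c = 0 ∨ c = 1) then
    some ((c * 2 + b) * 3 + a)
  else
    none

-- ===== PRECONDITION & SPEC =====
def Spec_evansObIndexA3 (a : Int) (b : Int) (c : Int) (out : Option Int) : Prop := out = evansObIndexA3_alt a b c
instance (a : Int) (b : Int) (c : Int) (out : Option Int) : Decidable (Spec_evansObIndexA3 a b c out) := by unfold Spec_evansObIndexA3; infer_instance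

-- ===== CLAIM (what is proved, stated in full; the proofs are below) =====
def Claim_equal_evansObIndexA3 : Prop := ∀ (a : Int) (b : Int) (c : Int), Dom_evansObIndexA3 a b c → Spec_evansObIndexA3 a b c (evansObIndexA3 a b c)

-- ===== LEMMAS AND PROOFS =====
theorem pvLoopA3_none (a b c B C i : Int)
    (h : ¬((a = 0 ∨ a = 1 ∨ a = 2) ∧ B = b ∧ C = c)) :
    pvLoopA3 a b c B C [0, 1, 2] i = (none, i + 1 + 1 + 1) := by
  simp only [pvLoopA3]
  rw [if_neg (fun hx => h ⟨Or.inl hx.1.symm, hx.2⟩),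
      if_neg (fun hx => h ⟨Or.inr (Or.inl hx.1.symm), hx.2⟩),
      if_neg (fun hx => h ⟨Or.inr (Or.inr hx.1.symm), hx.2⟩)]

theorem pvLoopB3_none (a b c C i : Int)
    (h : ¬((a = 0 ∨ a = 1 ∨ a = 2) ∧ (b = 0 ∨ b = 1) ∧ C = c)) :
    pvLoopB3 a b c C [0, 1] i = (none, i + 1 + 1 + 1 + 1 + 1 + 1) := by
  have r3 : PySem.List.pyRange 0 3 1 = [0, 1, 2] := by decide
  simp only [pvLoopB3, r3]
  rw [pvLoopA3_none a b c 0 C i (fun hx => h ⟨hx.1, Or.inl hx.2.1.symm, hx.2.2⟩)]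
  simp only []
  rw [pvLoopA3_none a b c 1 C _ (fun hx => h ⟨hx.1, Or.inr hx.2.1.symm, hx.2.2⟩)]

theorem pvLoopC3_none (a b c i : Int)
    (h : ¬((a = 0 ∨ a = 1 ∨ a = 2) ∧ (b = 0 ∨ b = 1) ∧ (c = 0 ∨ c = 1))) :
    (pvLoopC3 a b c [0, 1] i).1 = none := by
  have r2 : PySem.List.pyRange 0 2 1 = [0, 1] := by decide
  simp only [pvLoopC3, r2]
  rw [pvLoopB3_none a b c 0 i (fun hx => h ⟨hx.1, hx.2.1, Or.inl hx.2.2.symm⟩)]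
  simp only []
  rw [pvLoopB3_none a b c 1 _ (fun hx => h ⟨hx.1, hx.2.1, Or.inr hx.2.2.symm⟩)]

-- ===== VERDICT (by name: the statement is the Claim_ definition above) =====
theorem evansObIndexA3_spec : Claim_equal_evansObIndexA3 := by
  intro a b c _
  unfold Spec_evansObIndexA3 evansObIndexA3_alt
  by_cases h : (a = 0 ∨ a = 1 ∨ a = 2) ∧ (b = 0 ∨ b = 1) ∧ (c = 0 ∨ c = 1)
  · rcases h with ⟨(rfl | rfl | rfl), (rfl | rfl), (rfl | rfl)⟩ <;> decide
  · rw [if_neg h]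
    have r2 : PySem.List.pyRange 0 2 1 = [0, 1] := by decide
    simp only [evansObIndexA3, r2]
    exact pvLoopC3_none a b c 0 h
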